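-- pv_equiv track=rewrite | github.com/blopax/expert_system | old/expert_system.py | check_par_content
-- ===== SOURCE A (Python) =====
-- def check_par_content(line, i):
--     j = 0
--     while j < len(line) and line[j] != '#':
--         if line[j] == '(':
--             k = j + 1
--             content = 0
--             while k < len(line) and line[k] != '#' and line[k] != ')':
--                 if line[k].isupper():
--                     content = content + 1
--                 k += 1
--             if content == 0:
--                 print ("line : " + line + "\t\tError format: Parentheses contains nothing.")
--                 return False
--         j += 1
--     return True
-- ===== SOURCE B (Python) =====
-- def check_par_content(line, i):
--     # Single right-to-left pass: track whether an uppercase letter occurs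
--     # before the next ')' (within the part of the line before any '#').
--     s = line.split('#', 1)[0]
--     ok = True
--     has_upper = False
--     for c in reversed(s):
--         if c == ')':
--             has_upper = False
--         elif c.isupper():
--             has_upper = True
--         elif c == '(':
--             ok = ok and has_upper
--     if not ok:
--         print("line : " + line + "\t\tError format: Parentheses contains nothing.")
--     return ok
-- ===== Notes on version B (the rewrite author's own statement) =====
-- stated objective: faster
-- what changed: A rescans forward to the next ')' for every '(' (nested loops); B makes a single right-to-left pass over the part before '#', maintaining an 'uppercase seen before the next )' flag, and checks each '(' in O(1).
import Mathlib
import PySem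

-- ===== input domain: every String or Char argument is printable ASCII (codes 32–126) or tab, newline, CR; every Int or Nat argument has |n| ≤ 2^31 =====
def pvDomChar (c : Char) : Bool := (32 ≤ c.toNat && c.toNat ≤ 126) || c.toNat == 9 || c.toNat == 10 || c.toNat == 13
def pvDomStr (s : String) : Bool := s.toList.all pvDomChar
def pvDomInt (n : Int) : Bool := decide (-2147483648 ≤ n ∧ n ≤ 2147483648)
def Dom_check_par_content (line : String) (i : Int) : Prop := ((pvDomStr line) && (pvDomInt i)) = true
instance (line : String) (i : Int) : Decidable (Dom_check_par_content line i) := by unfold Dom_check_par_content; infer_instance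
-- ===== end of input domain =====

-- B replaces A's nested rescans with one right-to-left pass (asymptotically faster);
-- equal return values — A's print side effect on failure is not modelled (B prints once too, at the end).

-- ===== PORT A =====
-- inner while loop of A: count uppercase chars until ')' or '#' or end (recursion on the suffix after the '(')
def pvAInner (cs : List Char) (content : Int) : Int :=
  match cs with
  | [] => content
  | c :: rest =>
      if c = '#' ∨ c = ')' then content
      else pvAInner rest (if PySem.Chars.isupper c then content + 1 else content)

-- outer while loop of A (recursion on the suffix from index j)
def pvAOuter (cs : List Char) : Bool :=
  match cs with
  | [] => true
  | c :: rest =>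
      if c = '#' then true
      else if c = '(' then
        if pvAInner rest 0 = 0 then false else pvAOuter rest
      else pvAOuter rest

def check_par_content (line : String) (i : Int) : Bool :=
  pvAOuter line.toList

-- ===== PORT B =====
-- one step of B's reversed loop; state = (ok, has_upper)
def pvBStep (c : Char) (st : Bool × Bool) : Bool × Bool :=
  if c = ')' then (st.1, false)
  else if PySem.Chars.isupper c then (st.1, true)
  else if c = '(' then (st.1 && st.2, st.2)
  else st

-- s = line.split('#', 1)[0] : the prefix before the first '#'
def pvTrunc : List Char → List Char
  | [] => []
  | c :: rest => if c = '#' then [] else c :: pvTrunc rest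

def check_par_content_alt (line : String) (i : Int) : Bool :=
  ((pvTrunc line.toList).foldr pvBStep (true, false)).1

-- ===== PRECONDITION & SPEC =====
def Spec_check_par_content (line : String) (i : Int) (out : Bool) : Prop := out = check_par_content_alt line i
instance (line : String) (i : Int) (out : Bool) : Decidable (Spec_check_par_content line i out) := by unfold Spec_check_par_content; infer_instance

-- ===== CLAIM (what is proved, stated in full; the proofs are below) =====
def Claim_equal_check_par_content : Prop := ∀ (line : String) (i : Int), Dom_check_par_content line i → Spec_check_par_content line i (check_par_content line i)

-- ===== LEMMAS AND PROOFS =====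

theorem pvAInner_shift (cs : List Char) (c : Int) : pvAInner cs c = c + pvAInner cs 0 := by
  induction cs generalizing c with
  | nil => simp [pvAInner]
  | cons x xs ih =>
      simp only [pvAInner]
      split
      · simp
      · split
        · rw [ih (c + 1), ih (0 + 1)]; ring
        · exact ih c

theorem pvAInner_nonneg (cs : List Char) : 0 ≤ pvAInner cs 0 := by
  induction cs with
  | nil => simp [pvAInner]
  | cons x xs ih =>
      simp only [pvAInner]
      split
      · simp
      · split
        · rw [pvAInner_shift]; omega
        · exact ih

-- inner count is zero iff B's has_upper flag over the same suffix is false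
theorem pvInner_iff (xs : List Char) :
    (pvAInner xs 0 = 0) ↔ ((pvTrunc xs).foldr pvBStep (true, false)).2 = false := by
  induction xs with
  | nil => simp [pvAInner, pvTrunc]
  | cons x rest ih =>
      by_cases hx : x = '#'
      · simp [pvAInner, hx, pvTrunc]
      · rw [show pvTrunc (x :: rest) = x :: pvTrunc rest from by simp [pvTrunc, hx]]
        by_cases hr : x = ')'
        · simp [pvAInner, hr, pvBStep]
        · by_cases hu : PySem.Chars.isupper x
          · have h1 : pvAInner (x :: rest) 0 = 1 + pvAInner rest 0 := by
              simp only [pvAInner]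
              rw [if_neg (by tauto)]
              simp only [hu, if_true]
              rw [pvAInner_shift]; ring
            rw [h1]
            have h0 := pvAInner_nonneg rest
            simp only [List.foldr, pvBStep, if_neg hr, hu]
            constructor
            · intro h; omega
            · intro h; exact absurd h (by simp)
          · simp only [pvAInner]
            rw [if_neg (by tauto), if_neg hu, ih]
            simp only [List.foldr, pvBStep, if_neg hr, hu]
            by_cases hp : x = '('
            · simp [hp]
            · simp [hp]

theorem pvMain (cs : List Char) :
    pvAOuter cs = ((pvTrunc cs).foldr pvBStep (true, false)).1 := by
  induction cs with
  | nil => simp [pvAOuter, pvTrunc]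
  | cons x rest ih =>
      by_cases hx : x = '#'
      · simp [pvAOuter, hx, pvTrunc]
      · rw [show pvTrunc (x :: rest) = x :: pvTrunc rest from by simp [pvTrunc, hx]]
        simp only [pvAOuter, List.foldr, if_neg hx]
        by_cases hp : x = '('
        · have hr : ¬ x = ')' := by simp [hp]
          have hu : ¬ PySem.Chars.isupper x = true := by rw [hp]; decide
          rw [if_pos hp]
          simp only [pvBStep, if_neg hr, hu, if_pos hp]
          by_cases hz : pvAInner rest 0 = 0
          · have h2 := (pvInner_iff rest).mp hz
            simp [hz, h2]
          · have h2 : ((pvTrunc rest).foldr pvBStep (true, false)).2 = true := by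
              rcases Bool.eq_false_or_eq_true ((pvTrunc rest).foldr pvBStep (true, false)).2 with h | h
              · exact h
              · exact absurd ((pvInner_iff rest).mpr h) hz
            simp [hz, ih, h2]
        · rw [if_neg hp]
          simp only [pvBStep, if_neg hp]
          split
          · simpa using ih
          · split
            · simpa using ih
            · exact ih

-- ===== VERDICT (by name: the statement is the Claim_ definition above) =====
theorem check_par_content_spec : Claim_equal_check_par_content := by
  intro line i _
  unfold Spec_check_par_content check_par_content check_par_content_alt
  exact pvMain line.toList
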